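-- pv_equiv track=rewrite | github.com/YuanG1944/COMP9021_19T3_ALL | 9021 Python/9021 assignment_1/peoblem2_3.py | b_even_condition
-- ===== SOURCE A (Python) =====
-- def b_even_condition(l):
--     a = list(l)
--     for value in range(len(a) - 1):
--         if value % 2 == 0:
--             temp = a[value]
--             a[value] = a[value + 1]
--             a[value + 1] = temp
--     a = ''.join(a)
--     return a
-- ===== SOURCE B (Python) =====
-- def b_even_condition(l):
--     # Consume the items two at a time, emitting each pair swapped; a lone
--     # trailing item passes through unchanged.  No index arithmetic, no
--     # parity test, no in-place mutation.
--     a = list(l)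
--     it = iter(a)
--     out = []
--     for x in it:
--         y = next(it, None)
--         if y is None:
--             out.append(x)
--         else:
--             out.append(y)
--             out.append(x)
--     return ''.join(out)
-- ===== Notes on version B (the rewrite author's own statement) =====
-- stated objective: simpler
-- what changed: Replaces the index loop with parity tests and in-place element swaps by a single pass that consumes the items two at a time and emits each pair swapped into a fresh output list.
import Mathlib
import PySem

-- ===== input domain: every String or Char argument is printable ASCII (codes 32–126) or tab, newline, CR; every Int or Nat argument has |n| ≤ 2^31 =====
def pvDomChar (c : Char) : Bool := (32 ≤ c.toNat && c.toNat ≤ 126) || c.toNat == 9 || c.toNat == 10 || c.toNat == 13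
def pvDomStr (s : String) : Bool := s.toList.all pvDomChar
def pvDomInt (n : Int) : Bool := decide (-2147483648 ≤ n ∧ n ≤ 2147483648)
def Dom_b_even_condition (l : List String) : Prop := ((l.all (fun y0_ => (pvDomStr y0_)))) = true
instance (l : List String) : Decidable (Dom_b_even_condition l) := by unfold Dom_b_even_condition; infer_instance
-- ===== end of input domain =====

-- B replaces A's index loop with parity tests and in-place swaps by a single
-- two-at-a-time pass that emits each pair swapped (objective: simpler).

-- ===== PORT A =====
-- one iteration of A's loop body: 'if value % 2 == 0: swap a[value], a[value+1]'
def stepA (a : List String) (v : Int) : List String :=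
  if PySem.Int.mod v 2 = 0 then
    let temp := PySem.List.pyGetD a v ""
    let a1 := a.set v.toNat (PySem.List.pyGetD a (v + 1) "")
    a1.set (v + 1).toNat temp
  else a

def b_even_condition (l : List String) : String :=
  PySem.Str.join "" ((PySem.List.pyRange 0 ((l.length : Int) - 1) 1).foldl stepA l)

-- ===== PORT B =====
-- B's 'for x in it: y = next(it, None); …' loop: consume two items, emit them swapped
def altPairs : List String → List String
  | [] => []
  | [x] => [x]
  | x :: y :: r => y :: x :: altPairs r

def b_even_condition_alt (l : List String) : String :=
  PySem.Str.join "" (altPairs l)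

-- ===== PRECONDITION & SPEC =====
def Spec_b_even_condition (l : List String) (out : String) : Prop := out = b_even_condition_alt l
instance (l : List String) (out : String) : Decidable (Spec_b_even_condition l out) := by unfold Spec_b_even_condition; infer_instance

-- ===== CLAIM (what is proved, stated in full; the proofs are below) =====
def Claim_equal_b_even_condition : Prop := ∀ (l : List String), Dom_b_even_condition l → Spec_b_even_condition l (b_even_condition l)

-- ===== LEMMAS AND PROOFS =====
lemma stepA_zero (x y : String) (r : List String) : stepA (x :: y :: r) 0 = y :: x :: r := by
  simp [stepA, PySem.List.pyGetD]

lemma stepA_one (a : List String) : stepA a 1 = a := by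
  simp [stepA, PySem.Int.mod]

lemma stepA_shift (u v : String) (r : List String) (k : ℕ) :
    stepA (u :: v :: r) ((k : Int) + 2) = u :: v :: stepA r (k : Int) := by
  have hm : PySem.Int.mod ((k:Int)+2) 2 = PySem.Int.mod (k:Int) 2 := by
    rw [PySem.Int.mod_eq_emod_of_pos (by norm_num), PySem.Int.mod_eq_emod_of_pos (by norm_num)]
    omega
  have e1 : ((k : Int) + 2) = ((k + 2 : ℕ) : Int) := by push_cast; ring
  have e2 : ((k + 2 : ℕ) : Int) + 1 = ((k + 3 : ℕ) : Int) := by push_cast; ring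
  have e3 : ((k : Int) + 1) = ((k + 1 : ℕ) : Int) := by push_cast; ring
  rw [stepA, stepA, hm]
  split_ifs with h
  · rw [e1, e2, e3]
    rw [PySem.List.pyGetD_natCast, PySem.List.pyGetD_natCast, PySem.List.pyGetD_natCast,
       PySem.List.pyGetD_natCast, Int.toNat_natCast, Int.toNat_natCast, Int.toNat_natCast,
       Int.toNat_natCast]
    show ((u :: v :: r).set (k+2) ((u :: v :: r).getD (k+3) "")).set (k+3) ((u :: v :: r).getD (k+2) "")
       = u :: v :: ((r.set k (r.getD (k+1) "")).set (k+1) (r.getD k ""))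
    simp [List.set]
  · rfl

lemma foldl_stepA_shift : ∀ (ks : List ℕ) (r : List String) (u v : String),
    ks.foldl (fun a (k : ℕ) => stepA a (2 + (k:Int))) (u :: v :: r)
      = u :: v :: ks.foldl (fun a (k : ℕ) => stepA a ((0:Int) + (k:Int))) r
  | [], _, _, _ => rfl
  | k :: ks, r, u, v => by
    rw [List.foldl_cons, List.foldl_cons]
    rw [show (2 + (k:Int)) = (k:Int) + 2 by ring, stepA_shift]
    rw [foldl_stepA_shift ks (stepA r (k:Int)) u v]
    norm_num

lemma loopA : ∀ l : List String,
    (PySem.List.pyRange 0 ((l.length : Int) - 1) 1).foldl stepA l = altPairs l := by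
  intro l
  induction l using altPairs.induct with
  | case1 =>
    rw [PySem.List.pyRange_one_eq_nil (by norm_num)]; rfl
  | case2 x =>
    rw [PySem.List.pyRange_one_eq_nil (by norm_num)]; rfl
  | case3 x y r IH =>
    have hlen : (((x :: y :: r).length : Int)) - 1 = (r.length : Int) + 1 := by
      simp only [List.length_cons]; push_cast; ring
    rw [hlen, PySem.List.pyRange_one_cons (by positivity), List.foldl_cons, stepA_zero]
    rw [show (0:Int) + 1 = 1 by norm_num]
    cases r with
    | nil =>
      rw [PySem.List.pyRange_one_eq_nil (by norm_num)]
      rfl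
    | cons z r' =>
      rw [PySem.List.pyRange_one_cons (by simp only [List.length_cons]; push_cast; omega), List.foldl_cons, stepA_one]
      rw [show (1:Int) + 1 = 2 by norm_num]
      have h2 : (PySem.List.pyRange 2 (((z :: r').length : Int) + 1) 1)
          = (List.range r'.length).map (fun (k : ℕ) => 2 + (k:Int)) := by
        rw [PySem.List.pyRange_one]
        congr 1
        congr 1
        simp only [List.length_cons]; omega
      have h0 : (PySem.List.pyRange 0 (((z :: r').length : Int) - 1) 1)
          = (List.range r'.length).map (fun (k : ℕ) => (0:Int) + (k:Int)) := by
        rw [PySem.List.pyRange_one]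
        congr 1
        congr 1
        simp only [List.length_cons]; omega
      rw [h2, List.foldl_map, foldl_stepA_shift]
      rw [h0, List.foldl_map] at IH
      rw [IH]
      rfl

-- ===== VERDICT (by name: the statement is the Claim_ definition above) =====
theorem b_even_condition_spec : Claim_equal_b_even_condition := by
  intro l _
  unfold Spec_b_even_condition b_even_condition b_even_condition_alt
  rw [loopA]
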